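-- pv_equiv track=rewrite | github.com/AnnaGrBio/DESWOMAN | src/deswoman/module_handle_strat3_hits.py | create_dico_all_prot_hit
-- ===== SOURCE A (Python) =====
-- def create_dico_all_prot_hit(my_file: list) -> dict:
--     """
--     This function creates a dictionary where each key is a query (denovo protein) and each value is another
--     dictionary representing its BLAST hits (targets). Hits to the query itself are removed.
--
--     Parameters:
--         my_file (file object in readline mode): A file object containing the BLAST results, where each line represents a hit.
--                                The first column is the query, and the second column is the target.
--
--     Returns:
--         dict: A dictionary with queries as keys and their corresponding BLAST hits as values. Each value is
--               a dictionary where the target proteins are keys and all have a value of 1 (indicating a hit).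
--     """
--     dico_all_hits = {}
--     for line in my_file:
--         elts_line = line.split()
--         query = elts_line[0]
--         target = elts_line[1]
--         if query in dico_all_hits:
--             dico_all_hits[query][target] = 1
--         else:
--             dico_all_hits[query] = {target: 1}
--     # remove hits to itself
--     for query in dico_all_hits:
--         if query in dico_all_hits[query]:
--             del dico_all_hits[query][query]
--     return dico_all_hits
-- ===== SOURCE B (Python) =====
-- def create_dico_all_prot_hit(my_file: list) -> dict:
--     """Alternative algorithm: parse every line once into (query, target) pairs,
--     then group-by repeated filtering: take the first remaining pair's query,
--     build its whole inner dict in one comprehension (self-hits filtered out,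
--     duplicates collapsed by the dict), and drop all of that query's pairs."""
--     pairs = []
--     for line in my_file:
--         elts = line.split()
--         pairs.append((elts[0], elts[1]))
--     result = {}
--     while pairs:
--         q = pairs[0][0]
--         result[q] = {t: 1 for (x, t) in pairs if x == q and t != q}
--         pairs = [(x, t) for (x, t) in pairs if x != q]
--     return result
-- ===== Notes on version B (the rewrite author's own statement) =====
-- stated objective: alternative
-- what changed: B replaces A's incremental dict-building plus cleanup pass by a group-by algorithm: it parses all lines into (query,target) pairs once, then repeatedly takes the first remaining query, builds that query's entire inner dict in one comprehension (skipping self-hits), and filters away all of that query's pairs.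
import Mathlib
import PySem

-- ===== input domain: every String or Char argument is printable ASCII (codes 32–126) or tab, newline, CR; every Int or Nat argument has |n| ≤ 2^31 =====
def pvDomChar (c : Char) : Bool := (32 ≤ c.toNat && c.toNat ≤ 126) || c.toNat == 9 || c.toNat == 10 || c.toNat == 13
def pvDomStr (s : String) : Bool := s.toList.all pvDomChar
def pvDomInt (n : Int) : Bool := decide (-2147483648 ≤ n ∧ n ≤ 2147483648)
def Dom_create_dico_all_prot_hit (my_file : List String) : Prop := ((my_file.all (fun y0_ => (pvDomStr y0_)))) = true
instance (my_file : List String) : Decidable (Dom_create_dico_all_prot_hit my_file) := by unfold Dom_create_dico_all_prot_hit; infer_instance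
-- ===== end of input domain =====

-- B replaces A's dict-building + cleanup pass by parse-once-then-group-by-repeated-filtering;
-- the proved claim is about the returned dict only.


-- ===== PORT A =====
-- one line of A's first loop: split, take elts[0]/elts[1] (IndexError → Pre_ excludes), insert
def stepA (dico_all_hits : PySem.Dict String (PySem.Dict String Int)) (line : String) :
    PySem.Dict String (PySem.Dict String Int) :=
  let elts_line := PySem.Str.split₀ line
  match PySem.List.pyGet? elts_line 0, PySem.List.pyGet? elts_line 1 with
  | some query, some target =>
      if dico_all_hits.contains query then
        dico_all_hits.modify query PySem.Dict.empty (fun inner => inner.insert target 1)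
      else
        dico_all_hits.insert query ((PySem.Dict.empty : PySem.Dict String Int).insert target 1)
  | _, _ => dico_all_hits  -- unreachable under Pre_ (Python raises IndexError)

-- one step of A's cleanup loop over the keys
def cleanStep (d : PySem.Dict String (PySem.Dict String Int)) (query : String) :
    PySem.Dict String (PySem.Dict String Int) :=
  if (d.getD query PySem.Dict.empty).contains query then
    d.modify query PySem.Dict.empty (fun inner => inner.erase query)
  else d

def create_dico_all_prot_hit (my_file : List String) : List (String × List (String × Int)) :=
  let dico := my_file.foldl stepA PySem.Dict.empty
  let cleaned := dico.keys.foldl cleanStep dico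
  cleaned.items.map (fun p => (p.1, p.2.items))

-- ===== PORT B =====
-- B's parsing loop: append (elts[0], elts[1]) for each line (IndexError → Pre_ excludes)
def pvParseStep (acc : List (String × String)) (line : String) : List (String × String) :=
  let elts := PySem.Str.split₀ line
  match PySem.List.pyGet? elts 0, PySem.List.pyGet? elts 1 with
  | some q, some t => acc ++ [(q, t)]
  | _, _ => acc  -- unreachable under Pre_ (Python raises IndexError)

-- B's dict comprehension {t: 1 for (x, t) in pairs if x == q and t != q}
def pvInner (q : String) (pairs : List (String × String)) : PySem.Dict String Int :=
  pairs.foldl (fun d p => if p.1 = q ∧ p.2 ≠ q then d.insert p.2 1 else d) PySem.Dict.empty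

-- B's while loop: result[q] is a fresh key each round (all pairs with query q are then
-- filtered away), so the dict assignment is a cons on the items list
def pvGroup : List (String × String) → List (String × List (String × Int))
  | [] => []
  | p :: rest =>
      (p.1, (pvInner p.1 (p :: rest)).items) ::
        pvGroup ((p :: rest).filter (fun r => r.1 != p.1))
termination_by pairs => pairs.length
decreasing_by
  simp only [List.filter_cons, bne_self_eq_false, List.length_cons]
  exact Nat.lt_succ_of_le (List.length_filter_le _ _)

def create_dico_all_prot_hit_alt (my_file : List String) : List (String × List (String × Int)) :=
  pvGroup (my_file.foldl pvParseStep [])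

-- ===== PRECONDITION & SPEC =====
-- Pre_ excludes exactly the lines with fewer than two whitespace-separated fields,
-- on which the Python A (and B) raises IndexError.
def Pre_create_dico_all_prot_hit (my_file : List String) : Prop :=
  ∀ line ∈ my_file, 2 ≤ (PySem.Str.split₀ line).length
instance (my_file : List String) : Decidable (Pre_create_dico_all_prot_hit my_file) := by
  unfold Pre_create_dico_all_prot_hit; infer_instance

def pvWitness_create_dico_all_prot_hit : List String :=
  ["q1 t1 90.0", "q1 q1 100.0", "q1 t2 80.0", "q2 q2 100.0"]

def Spec_create_dico_all_prot_hit (my_file : List String) (out : List (String × List (String × Int))) : Prop := out = create_dico_all_prot_hit_alt my_file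
instance (my_file : List String) (out : List (String × List (String × Int))) : Decidable (Spec_create_dico_all_prot_hit my_file out) := by unfold Spec_create_dico_all_prot_hit; infer_instance

-- ===== CLAIM (what is proved, stated in full; the proofs are below) =====
def Claim_equal_create_dico_all_prot_hit : Prop := ∀ (my_file : List String), Dom_create_dico_all_prot_hit my_file → Pre_create_dico_all_prot_hit my_file → Spec_create_dico_all_prot_hit my_file (create_dico_all_prot_hit my_file)

-- ===== LEMMAS AND PROOFS =====

-- 'cleanMap d' is A's cleaned dict: every inner dict loses the key equal to its own query.
def cleanMap (d : PySem.Dict String (PySem.Dict String Int)) :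
    PySem.Dict String (PySem.Dict String Int) :=
  PySem.Dict.mk (d.items.map (fun p => (p.1, p.2.erase p.1)))

theorem erase_of_not_contains (inner : PySem.Dict String Int) (q : String)
    (h : inner.contains q = false) : inner.erase q = inner := by
  cases inner with
  | mk items =>
    simp only [PySem.Dict.erase, PySem.Dict.mk.injEq]
    apply List.filter_eq_self.mpr
    intro p hp
    simp [PySem.Dict.contains] at h
    simpa using h p.1 p.2 hp

-- replacing the key-q entries then dropping them = just dropping them
theorem filter_map_replace_self (q : String) (v : Int) (items : List (String × Int)) :
    List.filter (fun p => !p.1 == q) (items.map (fun p => if (p.1 == q) = true then (q, v) else p))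
      = List.filter (fun p => !p.1 == q) items := by
  simp only [beq_iff_eq]
  induction items with
  | nil => simp
  | cons p rest ih =>
    by_cases hq : p.1 = q
    · simp [hq, ih]
    · simp [hq, ih]

-- replacing key-t entries (t ≠ q) commutes with dropping key-q entries
theorem filter_map_replace_ne (q t : String) (v : Int) (hne : t ≠ q)
    (items : List (String × Int)) :
    List.filter (fun p => !p.1 == q) (items.map (fun p => if (p.1 == t) = true then (t, v) else p))
      = (List.filter (fun p => !p.1 == q) items).map
          (fun p => if (p.1 == t) = true then (t, v) else p) := by
  simp only [beq_iff_eq]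
  induction items with
  | nil => simp
  | cons p rest ih =>
    by_cases ht : p.1 = t
    · simp [ht, hne, ih]
    · by_cases hq : p.1 = q
      · simp [hq, ih, Ne.symm hne]
      · simp [ht, hq, ih]

theorem erase_insert_self (inner : PySem.Dict String Int) (q : String) (v : Int) :
    (inner.insert q v).erase q = inner.erase q := by
  cases inner with
  | mk items =>
    by_cases hc : (PySem.Dict.mk items).contains q = true
    · simp only [PySem.Dict.insert, hc, if_true, PySem.Dict.erase]
      exact congrArg PySem.Dict.mk (filter_map_replace_self q v items)
    · simp [PySem.Dict.insert, eq_false_of_ne_true hc, PySem.Dict.erase, List.filter_append]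

theorem erase_insert_of_ne (inner : PySem.Dict String Int) (q t : String) (v : Int)
    (hne : t ≠ q) : (inner.insert t v).erase q = (inner.erase q).insert t v := by
  cases inner with
  | mk items =>
    by_cases hc : (PySem.Dict.mk items).contains t = true
    · have hc' : ((PySem.Dict.mk items).erase q).contains t = true := by
        obtain ⟨p, hp, hpt⟩ := List.any_eq_true.mp hc
        have hpt' : p.1 = t := by simpa using hpt
        exact List.any_eq_true.mpr
          ⟨p, List.mem_filter.mpr ⟨hp, by simp [hpt', hne]⟩, hpt⟩
      apply PySem.Dict.ext
      show List.filter (fun p => !p.1 == q) (((PySem.Dict.mk items).insert t v).items)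
          = (((PySem.Dict.mk items).erase q).insert t v).items
      rw [PySem.Dict.items_insert_of_contains _ v hc, PySem.Dict.items_insert_of_contains _ v hc']
      exact filter_map_replace_ne q t v hne items
    · have hcf : (PySem.Dict.mk items).contains t = false := eq_false_of_ne_true hc
      have hc' : ((PySem.Dict.mk items).erase q).contains t = false := by
        refine List.any_eq_false.mpr ?_
        intro p hp
        exact List.any_eq_false.mp hcf p (List.mem_filter.mp hp).1
      apply PySem.Dict.ext
      show List.filter (fun p => !p.1 == q) (((PySem.Dict.mk items).insert t v).items)
          = (((PySem.Dict.mk items).erase q).insert t v).items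
      rw [PySem.Dict.items_insert_of_not_contains _ v hcf,
          PySem.Dict.items_insert_of_not_contains _ v hc']
      show List.filter (fun p => !p.1 == q) (items ++ [(t, v)])
          = List.filter (fun p => !p.1 == q) items ++ [(t, v)]
      rw [List.filter_append]
      simp [hne]

theorem insert_getD_self (d : PySem.Dict String (PySem.Dict String Int)) (q : String)
    (hnd : d.keys.Nodup) (hc : d.contains q = true) :
    d.insert q (d.getD q PySem.Dict.empty) = d := by
  apply PySem.Dict.ext
  rw [PySem.Dict.items_insert_of_contains d _ hc]
  conv_rhs => rw [← List.map_id d.items]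
  apply List.map_congr_left
  intro p hp
  by_cases hq : p.1 = q
  · have hp' : (q, p.2) ∈ d.items := by rw [← hq]; simpa using hp
    have hget : d.get? q = some p.2 := PySem.Dict.get?_of_mem_items d hp' hnd
    simp [hq, PySem.Dict.getD, hget]
    rw [← hq]
  · simp [hq]

theorem nodup_keys_stepA (d : PySem.Dict String (PySem.Dict String Int)) (line : String)
    (hnd : d.keys.Nodup) : (stepA d line).keys.Nodup := by
  simp only [stepA]
  rcases h0 : PySem.List.pyGet? (PySem.Str.split₀ line) 0 with _ | q
  · exact hnd
  · rcases h1 : PySem.List.pyGet? (PySem.Str.split₀ line) 1 with _ | t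
    · exact hnd
    · show (if d.contains q = true then d.modify q PySem.Dict.empty fun inner => inner.insert t 1
          else d.insert q (PySem.Dict.empty.insert t 1)).keys.Nodup
      split_ifs with h
      · rw [PySem.Dict.modify]
        exact PySem.Dict.nodup_keys_insert _ _ _ hnd
      · exact PySem.Dict.nodup_keys_insert _ _ _ hnd

theorem nodup_keys_foldA (lines : List String) (d : PySem.Dict String (PySem.Dict String Int))
    (hnd : d.keys.Nodup) : (lines.foldl stepA d).keys.Nodup := by
  induction lines generalizing d with
  | nil => simpa using hnd
  | cons l ls ih => exact ih _ (nodup_keys_stepA d l hnd)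

-- A's cleanup loop over a nodup key list ks ⊆ d.keys erases each listed query from its own inner dict
theorem clean_fold (ks : List String) (d : PySem.Dict String (PySem.Dict String Int))
    (hnd : d.keys.Nodup) (hksnd : ks.Nodup) (hsub : ∀ k ∈ ks, k ∈ d.keys) :
    ks.foldl cleanStep d =
      PySem.Dict.mk (d.items.map (fun p => if p.1 ∈ ks then (p.1, p.2.erase p.1) else p)) := by
  induction ks generalizing d with
  | nil =>
    simp
  | cons q ks ih =>
    have hqmem : q ∈ d.keys := hsub q (List.mem_cons_self)
    have hqc : d.contains q = true := (PySem.Dict.contains_iff_mem_keys d q).mpr hqmem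
    have hstep : cleanStep d q = d.insert q ((d.getD q PySem.Dict.empty).erase q) := by
      unfold cleanStep
      split_ifs with h
      · simp [PySem.Dict.modify]
      · rw [erase_of_not_contains _ _ (eq_false_of_ne_true h)]
        exact (insert_getD_self d q hnd hqc).symm
    have hitems : (cleanStep d q).items =
        d.items.map (fun p => if p.1 = q then (p.1, p.2.erase p.1) else p) := by
      rw [hstep, PySem.Dict.items_insert_of_contains _ _ hqc]
      apply List.map_congr_left
      intro p hp
      by_cases hpq : p.1 = q
      · have hp' : (q, p.2) ∈ d.items := by rw [← hpq]; simpa using hp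
        have hget : d.get? q = some p.2 := PySem.Dict.get?_of_mem_items d hp' hnd
        simp [hpq, PySem.Dict.getD, hget]
      · simp [hpq]
    have hkeys : (cleanStep d q).keys = d.keys := by
      show List.map (fun x => x.1) (cleanStep d q).items = List.map (fun x => x.1) d.items
      rw [hitems, List.map_map]
      apply List.map_congr_left
      intro p _
      by_cases hpq : p.1 = q <;> simp [hpq]
    simp only [List.foldl_cons]
    rw [ih (cleanStep d q) (by rw [hkeys]; exact hnd) hksnd.of_cons
        (fun k hk => by rw [hkeys]; exact hsub k (List.mem_cons_of_mem _ hk))]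
    congr 1
    rw [hitems, List.map_map]
    apply List.map_congr_left
    intro p _
    have hqks : q ∉ ks := (List.nodup_cons.mp hksnd).1
    by_cases hpq : p.1 = q
    · simp [hpq, hqks, List.mem_cons]
    · by_cases hpks : p.1 ∈ ks <;> simp [hpq, hpks, List.mem_cons]

theorem clean_fold_keys (d : PySem.Dict String (PySem.Dict String Int)) (hnd : d.keys.Nodup) :
    d.keys.foldl cleanStep d = cleanMap d := by
  rw [clean_fold d.keys d hnd hnd (fun _ h => h)]
  unfold cleanMap
  congr 1
  apply List.map_congr_left
  intro p hp
  have hmem : p.1 ∈ d.keys := List.mem_map_of_mem hp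
  simp [hmem]

-- ---- bridging A's line loop to a loop over parsed (query, target) pairs ----

-- the list of (query, target) pairs of the parseable lines (proof-side view of B's parse loop)
def parseL : List String → List (String × String)
  | [] => []
  | l :: ls =>
      match PySem.List.pyGet? (PySem.Str.split₀ l) 0, PySem.List.pyGet? (PySem.Str.split₀ l) 1 with
      | some q, some t => (q, t) :: parseL ls
      | _, _ => parseL ls

theorem parse_acc (lines : List String) (acc : List (String × String)) :
    lines.foldl pvParseStep acc = acc ++ parseL lines := by
  induction lines generalizing acc with
  | nil => simp [parseL]
  | cons l ls ih =>
    simp only [List.foldl_cons, pvParseStep, parseL]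
    rcases PySem.List.pyGet? (PySem.Str.split₀ l) 0 with _ | q
    · exact ih acc
    · rcases PySem.List.pyGet? (PySem.Str.split₀ l) 1 with _ | t
      · exact ih acc
      · rw [ih (acc ++ [(q, t)])]; simp

-- A's first-loop body on an already-parsed pair
def stepP (d : PySem.Dict String (PySem.Dict String Int)) (p : String × String) :
    PySem.Dict String (PySem.Dict String Int) :=
  if d.contains p.1 then d.modify p.1 PySem.Dict.empty (fun inner => inner.insert p.2 1)
  else d.insert p.1 ((PySem.Dict.empty : PySem.Dict String Int).insert p.2 1)

theorem foldA_eq_foldP (lines : List String) (d : PySem.Dict String (PySem.Dict String Int)) :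
    lines.foldl stepA d = (parseL lines).foldl stepP d := by
  induction lines generalizing d with
  | nil => rfl
  | cons l ls ih =>
    simp only [List.foldl_cons, stepA, parseL]
    rcases PySem.List.pyGet? (PySem.Str.split₀ l) 0 with _ | q
    · exact ih d
    · rcases PySem.List.pyGet? (PySem.Str.split₀ l) 1 with _ | t
      · exact ih d
      · simp only [List.foldl_cons]
        exact ih _

-- A's inner-dict accumulation for one fixed query q over a pair list
def innerFold (i : PySem.Dict String Int) (q : String) (pairs : List (String × String)) :
    PySem.Dict String Int :=
  pairs.foldl (fun d p => if p.1 = q then d.insert p.2 1 else d) i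

-- key structural lemma: the pair loop keeps the first key's entry in front and the
-- rest of the dict is the same loop run on the pairs of the other keys
theorem foldP_head (pairs : List (String × String)) (q : String) (i : PySem.Dict String Int)
    (ds : PySem.Dict String (PySem.Dict String Int)) (hq : ds.contains q = false) :
    pairs.foldl stepP (PySem.Dict.mk ((q, i) :: ds.items))
      = PySem.Dict.mk ((q, innerFold i q pairs)
          :: ((pairs.filter (fun p => p.1 != q)).foldl stepP ds).items) := by
  induction pairs generalizing i ds with
  | nil => simp [innerFold]
  | cons p pr ih =>
    by_cases hpq : p.1 = q
    · have hstep : stepP (PySem.Dict.mk ((q, i) :: ds.items)) p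
          = PySem.Dict.mk ((q, i.insert p.2 1) :: ds.items) := by
        have hc : (PySem.Dict.mk ((q, i) :: ds.items)).contains p.1 = true := by
          simp [PySem.Dict.contains, hpq]
        have hgd : (PySem.Dict.mk ((q, i) :: ds.items)).getD p.1 PySem.Dict.empty = i := by
          simp [PySem.Dict.getD, PySem.Dict.get?, hpq]
        rw [stepP, if_pos hc, PySem.Dict.modify, hgd]
        apply PySem.Dict.ext
        rw [PySem.Dict.items_insert_of_contains _ _ hc]
        show List.map _ ((q, i) :: ds.items) = (q, i.insert p.2 1) :: ds.items
        rw [List.map_cons]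
        congr 1
        · simp [hpq]
        conv_rhs => rw [← List.map_id ds.items]
        apply List.map_congr_left
        intro r hr
        have : r.1 ≠ q := by
          intro h
          have : ds.contains q = true := List.any_eq_true.mpr ⟨r, hr, by simp [h]⟩
          rw [this] at hq; cases hq
        simp [hpq, this]
      rw [List.foldl_cons, hstep, ih _ _ hq]
      have hfil : (p :: pr).filter (fun r => r.1 != q) = pr.filter (fun r => r.1 != q) := by
        simp [hpq]
      have hinner : innerFold i q (p :: pr) = innerFold (i.insert p.2 1) q pr := by
        simp [innerFold, List.foldl_cons, hpq]
      rw [hfil, hinner]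
    · have hcds := hq
      have hcontains : (PySem.Dict.mk ((q, i) :: ds.items)).contains p.1 = ds.contains p.1 := by
        simp [PySem.Dict.contains, Ne.symm hpq]
      have hstep : stepP (PySem.Dict.mk ((q, i) :: ds.items)) p
          = PySem.Dict.mk ((q, i) :: (stepP ds p).items) := by
        by_cases hc : ds.contains p.1 = true
        · have hgd : (PySem.Dict.mk ((q, i) :: ds.items)).getD p.1 PySem.Dict.empty
              = ds.getD p.1 PySem.Dict.empty := by
            simp [PySem.Dict.getD, PySem.Dict.get?, Ne.symm hpq]
          rw [stepP, if_pos (by rw [hcontains]; exact hc), PySem.Dict.modify, hgd,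
              stepP, if_pos hc, PySem.Dict.modify]
          apply PySem.Dict.ext
          rw [PySem.Dict.items_insert_of_contains _ _ (by rw [hcontains]; exact hc)]
          show List.map _ ((q, i) :: ds.items)
              = (q, i) :: ((ds.insert p.1 _).items)
          rw [PySem.Dict.items_insert_of_contains _ _ hc]
          simp [Ne.symm hpq]
        · have hcf : ds.contains p.1 = false := eq_false_of_ne_true hc
          rw [stepP, if_neg (by rw [hcontains, hcf]; simp), stepP, if_neg (by rw [hcf]; simp)]
          apply PySem.Dict.ext
          rw [PySem.Dict.items_insert_of_not_contains _ _ (by rw [hcontains]; exact hcf)]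
          show ((q, i) :: ds.items) ++ [(p.1, _)] = (q, i) :: ((ds.insert p.1 _).items)
          rw [PySem.Dict.items_insert_of_not_contains _ _ hcf]
          simp
      have hq' : (stepP ds p).contains q = false := by
        unfold stepP
        split_ifs with hc
        · rw [PySem.Dict.modify, PySem.Dict.contains_insert]
          simp [hq, Ne.symm hpq]
        · rw [PySem.Dict.contains_insert]
          simp [hq, Ne.symm hpq]
      rw [List.foldl_cons, hstep, ih _ _ hq']
      have hfil : (p :: pr).filter (fun r => r.1 != q)
          = p :: pr.filter (fun r => r.1 != q) := by
        simp [hpq]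
      have hinner : innerFold i q (p :: pr) = innerFold i q pr := by
        simp [innerFold, List.foldl_cons, hpq]
      rw [hfil, hinner, List.foldl_cons]

-- erasing the query key commutes with the accumulation and becomes B's filtered comprehension
theorem erase_innerFold (pairs : List (String × String)) (q : String) (i : PySem.Dict String Int) :
    (innerFold i q pairs).erase q
      = pairs.foldl (fun d p => if p.1 = q ∧ p.2 ≠ q then d.insert p.2 1 else d) (i.erase q) := by
  induction pairs generalizing i with
  | nil => rfl
  | cons p pr ih =>
    simp only [innerFold, List.foldl_cons] at *
    by_cases hpq : p.1 = q
    · by_cases htq : p.2 = q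
      · rw [if_pos hpq, if_neg (by simp [htq]), ih (i.insert p.2 1)]
        rw [htq, erase_insert_self]
      · rw [if_pos hpq, if_pos ⟨hpq, htq⟩, ih (i.insert p.2 1), erase_insert_of_ne _ _ _ _ htq]
    · rw [if_neg hpq, if_neg (by simp [hpq]), ih i]

theorem empty_erase (q : String) :
    (PySem.Dict.empty : PySem.Dict String Int).erase q = PySem.Dict.empty := rfl

-- main lemma: cleaning A's dict built from a pair list and listing it = B's group-by
theorem clean_buildP (n : Nat) (pairs : List (String × String)) (hlen : pairs.length ≤ n) :
    (cleanMap (pairs.foldl stepP PySem.Dict.empty)).items.map (fun p => (p.1, p.2.items))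
      = pvGroup pairs := by
  induction n generalizing pairs with
  | zero =>
    have : pairs = [] := List.eq_nil_of_length_eq_zero (Nat.le_zero.mp hlen)
    subst this; simp [pvGroup, cleanMap, PySem.Dict.empty]
  | succ n ih =>
    match pairs with
    | [] => simp [pvGroup, cleanMap, PySem.Dict.empty]
    | (q, t) :: pr =>
      have hstep0 : stepP (PySem.Dict.empty : PySem.Dict String (PySem.Dict String Int)) (q, t)
          = PySem.Dict.mk [(q, (PySem.Dict.empty : PySem.Dict String Int).insert t 1)] := rfl
      have hne : (PySem.Dict.empty : PySem.Dict String (PySem.Dict String Int)).contains q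
          = false := rfl
      have hbuild := foldP_head pr q ((PySem.Dict.empty : PySem.Dict String Int).insert t 1)
        PySem.Dict.empty hne
      have hIer : (innerFold ((PySem.Dict.empty : PySem.Dict String Int).insert t 1) q pr).erase q
          = pvInner q ((q, t) :: pr) := by
        have h1 : innerFold ((PySem.Dict.empty : PySem.Dict String Int).insert t 1) q pr
            = innerFold PySem.Dict.empty q ((q, t) :: pr) := by
          simp [innerFold, List.foldl_cons]
        rw [h1, erase_innerFold, empty_erase]
        rfl
      calc (cleanMap (((q, t) :: pr).foldl stepP PySem.Dict.empty)).items.map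
              (fun p => (p.1, p.2.items))
          = ((q, (innerFold ((PySem.Dict.empty : PySem.Dict String Int).insert t 1) q pr).erase q)
              :: (cleanMap ((pr.filter (fun p => p.1 != q)).foldl stepP
                    PySem.Dict.empty)).items).map (fun p => (p.1, p.2.items)) := by
            rw [List.foldl_cons, hstep0]
            have : (PySem.Dict.mk [(q, (PySem.Dict.empty : PySem.Dict String Int).insert t 1)])
                = PySem.Dict.mk ((q, (PySem.Dict.empty : PySem.Dict String Int).insert t 1)
                    :: (PySem.Dict.empty : PySem.Dict String (PySem.Dict String Int)).items) := rfl
            rw [this, hbuild]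
            simp [cleanMap]
        _ = (q, (pvInner q ((q, t) :: pr)).items)
              :: pvGroup (pr.filter (fun p => p.1 != q)) := by
            rw [hIer, List.map_cons]
            congr 1
            exact ih _ (by
              have := List.length_filter_le (fun p => p.1 != q) pr
              simp only [List.length_cons] at hlen
              omega)
        _ = pvGroup ((q, t) :: pr) := by
            rw [pvGroup]
            simp

-- ===== VERDICT (by name: the statement is the Claim_ definition above) =====
theorem create_dico_all_prot_hit_spec : Claim_equal_create_dico_all_prot_hit := by
  intro my_file _ _
  unfold Spec_create_dico_all_prot_hit
  show (let dico := my_file.foldl stepA PySem.Dict.empty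
        let cleaned := dico.keys.foldl cleanStep dico
        cleaned.items.map (fun p => (p.1, p.2.items)))
      = pvGroup (my_file.foldl pvParseStep [])
  have hnd : (my_file.foldl stepA PySem.Dict.empty).keys.Nodup :=
    nodup_keys_foldA my_file PySem.Dict.empty (by simp [PySem.Dict.empty, PySem.Dict.keys])
  simp only
  rw [clean_fold_keys _ hnd, foldA_eq_foldP, parse_acc, List.nil_append]
  exact clean_buildP (parseL my_file).length (parseL my_file) le_rfl
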